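-- pv_equiv track=rewrite | github.com/austinlasseter/neabscoCreek | python_practice/cuboid.py | cuboid
-- ===== SOURCE A (Python) =====
-- def cuboid (x,y,z,n):
--     # print ([[a,b,c] for a in range(0,x+1) for b in range(0,y+1) for c in range(0,z+1) if a + b + c != n ])
--
--     mylist=[]
--     for c in range(z+1):
--         for b in range(y+1):
--             for a in range(x+1):
--                 if a + b + c != n:
--                     mylist.append([a,b,c])
--     return mylist
-- ===== SOURCE B (Python) =====
-- def cuboid(x, y, z, n):
--     X, Y, Z = x + 1, y + 1, z + 1
--     out = []
--     if X <= 0 or Y <= 0 or Z <= 0: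
--         return out
--     a = b = c = 0
--     for _ in range(X * Y * Z):
--         if a + b + c != n:
--             out.append([a, b, c])
--         a += 1
--         if a == X:
--             a = 0
--             b += 1
--             if b == Y:
--                 b = 0
--                 c += 1
--     return out
-- ===== Notes on version B (the rewrite author's own statement) =====
-- stated objective: alternative
-- what changed: A's three nested loops are replaced by one flat loop running (x+1)*(y+1)*(z+1) times that advances a single odometer counter (a,b,c) with carry propagation; an emptiness guard handles non-positive dimensions.
import Mathlib
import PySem

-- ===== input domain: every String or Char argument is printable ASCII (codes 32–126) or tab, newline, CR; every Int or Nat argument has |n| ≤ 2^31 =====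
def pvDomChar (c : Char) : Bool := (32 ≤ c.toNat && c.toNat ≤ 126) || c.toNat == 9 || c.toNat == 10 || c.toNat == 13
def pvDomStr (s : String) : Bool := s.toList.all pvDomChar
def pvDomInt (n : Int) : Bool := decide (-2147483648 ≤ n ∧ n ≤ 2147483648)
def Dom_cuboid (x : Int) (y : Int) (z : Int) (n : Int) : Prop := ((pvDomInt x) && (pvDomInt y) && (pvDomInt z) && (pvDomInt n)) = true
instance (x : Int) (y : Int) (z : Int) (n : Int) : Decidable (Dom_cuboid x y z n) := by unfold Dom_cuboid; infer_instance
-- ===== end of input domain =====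

-- B replaces A's three nested loops by ONE flat loop that advances an odometer counter (a,b,c) with carry propagation (alternative algorithm, same cost).

-- ===== PORT A =====
def cuboid (x : Int) (y : Int) (z : Int) (n : Int) : List (List Int) :=
  (PySem.List.pyRange 0 (z + 1) 1).foldl (fun mylist c =>
    (PySem.List.pyRange 0 (y + 1) 1).foldl (fun mylist b =>
      (PySem.List.pyRange 0 (x + 1) 1).foldl (fun mylist a =>
        if a + b + c ≠ n then mylist ++ [[a, b, c]] else mylist) mylist) mylist) []

-- ===== PORT B =====
def cuboid_alt (x : Int) (y : Int) (z : Int) (n : Int) : List (List Int) :=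
  let X := x + 1
  let Y := y + 1
  let Z := z + 1
  if X ≤ 0 ∨ Y ≤ 0 ∨ Z ≤ 0 then []
  else
    ((PySem.List.pyRange 0 (X * Y * Z) 1).foldl (fun s _ =>
      let out := if s.1 + s.2.1 + s.2.2.1 ≠ n then s.2.2.2 ++ [[s.1, s.2.1, s.2.2.1]] else s.2.2.2
      let a := s.1 + 1
      if a = X then
        let b := s.2.1 + 1
        if b = Y then ((0 : Int), (0 : Int), s.2.2.1 + 1, out) else ((0 : Int), b, s.2.2.1, out)
      else (a, s.2.1, s.2.2.1, out))
      ((0 : Int), (0 : Int), (0 : Int), ([] : List (List Int)))).2.2.2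

-- ===== PRECONDITION & SPEC =====
def Spec_cuboid (x : Int) (y : Int) (z : Int) (n : Int) (out : List (List Int)) : Prop := out = cuboid_alt x y z n
instance (x : Int) (y : Int) (z : Int) (n : Int) (out : List (List Int)) : Decidable (Spec_cuboid x y z n out) := by unfold Spec_cuboid; infer_instance

-- ===== CLAIM (what is proved, stated in full; the proofs are below) =====
def Claim_equal_cuboid : Prop := ∀ (x : Int) (y : Int) (z : Int) (n : Int), Dom_cuboid x y z n → Spec_cuboid x y z n (cuboid x y z n)

-- ===== LEMMAS AND PROOFS =====

-- B's loop body and the divmod decoding of the flat index, as named proof-side abbreviations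
def stepB (X Y n : Int) (s : Int × Int × Int × List (List Int)) : Int × Int × Int × List (List Int) :=
  let out := if s.1 + s.2.1 + s.2.2.1 ≠ n then s.2.2.2 ++ [[s.1, s.2.1, s.2.2.1]] else s.2.2.2
  let a := s.1 + 1
  if a = X then
    let b := s.2.1 + 1
    if b = Y then ((0 : Int), (0 : Int), s.2.2.1 + 1, out) else ((0 : Int), b, s.2.2.1, out)
  else (a, s.2.1, s.2.2.1, out)

def bodyB (x y n : Int) (t : Int) : List (List Int) :=
  if PySem.Int.mod (PySem.Int.mod t ((y + 1) * (x + 1))) (x + 1) +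
      PySem.Int.floordiv (PySem.Int.mod t ((y + 1) * (x + 1))) (x + 1) +
      PySem.Int.floordiv t ((y + 1) * (x + 1)) ≠ n then
    [[PySem.Int.mod (PySem.Int.mod t ((y + 1) * (x + 1))) (x + 1),
      PySem.Int.floordiv (PySem.Int.mod t ((y + 1) * (x + 1))) (x + 1),
      PySem.Int.floordiv t ((y + 1) * (x + 1))]]
  else []

-- conditional-append loop = flatMap of conditional singletons (the shape of A's innermost loop)
theorem foldl_append_ite {α β : Type} (P : α → Prop) [DecidablePred P] (f : α → β) :
    ∀ (l : List α) (acc : List β),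
      l.foldl (fun acc v => if P v then acc ++ [f v] else acc) acc =
      acc ++ l.flatMap (fun v => if P v then [f v] else []) := by
  intro l
  induction l with
  | nil => simp
  | cons h t ih =>
    intro acc
    by_cases hP : P h <;> simp [hP, ih]

-- a fold that ignores its elements is the identity
theorem foldl_const {α β : Type} : ∀ (l : List α) (acc : β), l.foldl (fun acc _ => acc) acc = acc := by
  intro l
  induction l with
  | nil => simp
  | cons h t ih => intro acc; simp [ih]

-- the W-long segment of a range starting at k*W
theorem pyRange_seg (W k : Int) :
    PySem.List.pyRange (k * W) (k * W + W) 1 = (PySem.List.pyRange 0 W 1).map (fun r => k * W + r) := by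
  rw [PySem.List.pyRange_one, PySem.List.pyRange_one, List.map_map]
  have h1 : k * W + W - k * W = W := by ring
  have h2 : W - (0 : Int) = W := by ring
  rw [h1, h2]
  apply List.map_congr_left
  intro j _
  simp

-- decoding a flat range by divmod = the nested double range (in loop order)
theorem flatMap_decode {β : Type} (W : Int) (hW : 0 < W) (g : Int → Int → List β) :
    ∀ (k : Nat),
      (PySem.List.pyRange 0 ((k : Int) * W) 1).flatMap
        (fun t => g (PySem.Int.floordiv t W) (PySem.Int.mod t W)) =
      (PySem.List.pyRange 0 (k : Int) 1).flatMap
        (fun c => (PySem.List.pyRange 0 W 1).flatMap (g c)) := by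
  intro k
  induction k with
  | zero => simp [PySem.List.pyRange_one_eq_nil]
  | succ k ih =>
    have hk : (0 : Int) ≤ (k : Int) * W := by positivity
    have hcast : ((k + 1 : Nat) : Int) * W = (k : Int) * W + W := by push_cast; ring
    rw [hcast, PySem.List.pyRange_one_append 0 ((k : Int) * W) ((k : Int) * W + W) hk (by linarith),
        List.flatMap_append, ih,
        pyRange_seg W (k : Int), List.flatMap_map,
        show ((k + 1 : Nat) : Int) = (k : Int) + 1 by push_cast; ring,
        PySem.List.pyRange_one_succ_right (by positivity : (0 : Int) ≤ (k : Int)), List.flatMap_append]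
    congr 1
    simp only [List.flatMap_cons, List.flatMap_nil, List.append_nil]
    apply List.flatMap_congr
    intro r hr
    rw [PySem.List.mem_pyRange_one] at hr
    have hq : PySem.Int.floordiv ((k : Int) * W + r) W = (k : Int) := by
      rw [PySem.Int.floordiv_eq_iff_of_pos hW]
      constructor
      · linarith [hr.1]
      · have : ((k : Int) + 1) * W = (k : Int) * W + W := by ring
        rw [this]; linarith [hr.2]
    have hm : PySem.Int.mod ((k : Int) * W + r) W = r := by
      have := PySem.Int.floordiv_mul_add_mod ((k : Int) * W + r) W
      rw [hq] at this
      linarith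
    simp [hq, hm]

-- A returns [] whenever one of the three ranges is empty
theorem cuboid_empty (x y z n : Int) (h : x + 1 ≤ 0 ∨ y + 1 ≤ 0 ∨ z + 1 ≤ 0) :
    cuboid x y z n = [] := by
  unfold cuboid
  rcases h with h | h | h
  · rw [PySem.List.pyRange_one_eq_nil (by linarith : (x + 1 : Int) ≤ 0)]
    simp only [List.foldl_nil]
    rw [show (fun (mylist : List (List Int)) (c : Int) =>
          (PySem.List.pyRange 0 (y + 1) 1).foldl (fun mylist b => mylist) mylist) =
        (fun mylist _ => mylist) from by funext mylist c; rw [foldl_const]]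
    rw [foldl_const]
  · rw [PySem.List.pyRange_one_eq_nil (by linarith : (y + 1 : Int) ≤ 0)]
    simp only [List.foldl_nil]
    rw [foldl_const]
  · rw [PySem.List.pyRange_one_eq_nil (by linarith : (z + 1 : Int) ≤ 0)]
    simp

-- Nat carry arithmetic: the successor's mod and div in odometer form
theorem succ_mod_carry (q m : Nat) (hm : 0 < m) :
    (q + 1) % m = if q % m + 1 = m then 0 else q % m + 1 := by
  have e : m * (q / m) + (q % m + 1) = q + 1 := by rw [← Nat.add_assoc, Nat.div_add_mod]
  split_ifs with h1
  · have e2 : m * (q / m + 1) = q + 1 := by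
      have h3 : m * (q / m + 1) = m * (q / m) + (q % m + 1) := by rw [Nat.mul_add, Nat.mul_one, h1]
      rw [h3, e]
    rw [← e2, Nat.mul_mod_right]
  · have hlt : q % m + 1 < m := lt_of_le_of_ne (Nat.succ_le_of_lt (Nat.mod_lt q hm)) h1
    rw [← e, Nat.mul_add_mod, Nat.mod_eq_of_lt hlt]

theorem succ_div_carry (q m : Nat) (hm : 0 < m) :
    (q + 1) / m = if q % m + 1 = m then q / m + 1 else q / m := by
  have e : m * (q / m) + (q % m + 1) = q + 1 := by rw [← Nat.add_assoc, Nat.div_add_mod]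
  split_ifs with h1
  · have e2 : m * (q / m + 1) = q + 1 := by
      have h3 : m * (q / m + 1) = m * (q / m) + (q % m + 1) := by rw [Nat.mul_add, Nat.mul_one, h1]
      rw [h3, e]
    rw [← e2, Nat.mul_div_cancel_left _ hm]
  · have hlt : q % m + 1 < m := lt_of_le_of_ne (Nat.succ_le_of_lt (Nat.mod_lt q hm)) h1
    rw [← e, Nat.mul_add_div hm, Nat.div_eq_of_lt hlt, Nat.add_zero]

-- B's decoded body at a flat index ↑k, in Nat odometer coordinates
theorem bodyB_natCast (x y n : Int) (Xn Yn : Nat)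
    (hx : ((Xn : Nat) : Int) = x + 1) (hy : ((Yn : Nat) : Int) = y + 1) (k : Nat) :
    bodyB x y n (k : Int) =
      (if ((k % Xn : Nat) : Int) + ((k / Xn % Yn : Nat) : Int) + ((k / Xn / Yn : Nat) : Int) ≠ n then
        [[((k % Xn : Nat) : Int), ((k / Xn % Yn : Nat) : Int), ((k / Xn / Yn : Nat) : Int)]]
      else []) := by
  have hmm : k % (Yn * Xn) % Xn = k % Xn := Nat.mod_mod_of_dvd k (dvd_mul_left _ _)
  have hmd : k % (Yn * Xn) / Xn = k / Xn % Yn := by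
    rw [Nat.mul_comm Yn Xn, Nat.mod_mul_right_div_self]
  have hdd : k / (Yn * Xn) = k / Xn / Yn := by
    rw [Nat.div_div_eq_div_mul, Nat.mul_comm]
  unfold bodyB
  rw [← hx, ← hy, show ((Yn : Int) * (Xn : Int)) = ((Yn * Xn : Nat) : Int) from by push_cast; ring]
  rw [PySem.Int.mod_natCast, PySem.Int.mod_natCast, PySem.Int.floordiv_natCast,
      PySem.Int.floordiv_natCast, hmm, hmd, hdd]

-- loop invariant: after k odometer steps the state is (k mod X, k div X mod Y, k div X div Y)
-- and the output so far is the flat decoded prefix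
theorem odometer_inv (x y n : Int) (Xn Yn : Nat) (hXn : 0 < Xn) (hYn : 0 < Yn)
    (hx : ((Xn : Nat) : Int) = x + 1) (hy : ((Yn : Nat) : Int) = y + 1) :
    ∀ k : Nat,
      (PySem.List.pyRange 0 (k : Int) 1).foldl (fun s (_ : Int) => stepB (x + 1) (y + 1) n s)
        ((0 : Int), (0 : Int), (0 : Int), ([] : List (List Int))) =
      (((k % Xn : Nat) : Int), ((k / Xn % Yn : Nat) : Int), ((k / Xn / Yn : Nat) : Int),
       (PySem.List.pyRange 0 (k : Int) 1).flatMap (bodyB x y n)) := by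
  intro k
  induction k with
  | zero =>
    rw [show ((0 : Nat) : Int) = 0 from rfl, PySem.List.pyRange_one_eq_nil le_rfl]
    simp
  | succ k ih =>
    rw [show ((k + 1 : Nat) : Int) = (k : Int) + 1 by push_cast; ring,
        PySem.List.pyRange_one_succ_right (by positivity : (0 : Int) ≤ (k : Int)),
        List.foldl_append, List.flatMap_append, ih]
    simp only [List.foldl_cons, List.foldl_nil, List.flatMap_cons, List.flatMap_nil,
      List.append_nil]
    rw [bodyB_natCast x y n Xn Yn hx hy k]
    unfold stepB
    simp only []
    have hAi : (((k % Xn : Nat) : Int) + 1 = x + 1) ↔ (k % Xn + 1 = Xn) := by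
      rw [← hx]
      constructor
      · intro h; exact_mod_cast h
      · intro h; exact_mod_cast congrArg (fun m : Nat => (m : Int)) h
    have hBi : (((k / Xn % Yn : Nat) : Int) + 1 = y + 1) ↔ (k / Xn % Yn + 1 = Yn) := by
      rw [← hy]
      constructor
      · intro h; exact_mod_cast h
      · intro h; exact_mod_cast congrArg (fun m : Nat => (m : Int)) h
    rw [succ_mod_carry k Xn hXn, succ_div_carry k Xn hXn]
    by_cases hA : k % Xn + 1 = Xn
    · rw [if_pos hA, if_pos hA,
          succ_mod_carry (k / Xn) Yn hYn, succ_div_carry (k / Xn) Yn hYn,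
          if_pos (hAi.mpr hA)]
      by_cases hB : k / Xn % Yn + 1 = Yn
      · rw [if_pos hB, if_pos hB, if_pos (hBi.mpr hB)]
        by_cases hc : ((k % Xn : Nat) : Int) + ((k / Xn % Yn : Nat) : Int) +
            ((k / Xn / Yn : Nat) : Int) = n <;> push_cast at hc ⊢ <;> simp [hc]
      · rw [if_neg hB, if_neg hB, if_neg (fun h => hB (hBi.mp h))]
        by_cases hc : ((k % Xn : Nat) : Int) + ((k / Xn % Yn : Nat) : Int) +
            ((k / Xn / Yn : Nat) : Int) = n <;> push_cast at hc ⊢ <;> simp [hc]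
    · rw [if_neg hA, if_neg hA, if_neg (fun h => hA (hAi.mp h))]
      by_cases hc : ((k % Xn : Nat) : Int) + ((k / Xn % Yn : Nat) : Int) +
          ((k / Xn / Yn : Nat) : Int) = n <;> push_cast at hc ⊢ <;> simp [hc]

-- ===== VERDICT (by name: the statement is the Claim_ definition above) =====
theorem cuboid_spec : Claim_equal_cuboid := by
  intro x y z n _
  unfold Spec_cuboid cuboid_alt
  simp only []
  by_cases hg : x + 1 ≤ 0 ∨ y + 1 ≤ 0 ∨ z + 1 ≤ 0
  · rw [if_pos hg, cuboid_empty x y z n hg]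
  · rw [if_neg hg]
    push Not at hg
    obtain ⟨hX, hY, hZ⟩ := hg
    show cuboid x y z n =
      ((PySem.List.pyRange 0 ((x + 1) * (y + 1) * (z + 1)) 1).foldl
        (fun s (_ : Int) => stepB (x + 1) (y + 1) n s)
        ((0 : Int), (0 : Int), (0 : Int), ([] : List (List Int)))).2.2.2
    have hN : (x + 1) * (y + 1) * (z + 1) =
        ((((x + 1) * (y + 1) * (z + 1)).toNat : Nat) : Int) :=
      (Int.toNat_of_nonneg (by positivity)).symm
    have hXc : (((x + 1).toNat : Nat) : Int) = x + 1 := Int.toNat_of_nonneg (by linarith)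
    have hYc : (((y + 1).toNat : Nat) : Int) = y + 1 := Int.toNat_of_nonneg (by linarith)
    rw [hN, odometer_inv x y n (x + 1).toNat (y + 1).toNat (by omega) (by omega) hXc hYc
      (((x + 1) * (y + 1) * (z + 1)).toNat), ← hN]
    show cuboid x y z n =
      (PySem.List.pyRange 0 ((x + 1) * (y + 1) * (z + 1)) 1).flatMap (bodyB x y n)
    unfold cuboid
    simp only [foldl_append_ite, PySem.List.foldl_append_eq_flatMap, List.nil_append]
    have hz : (((z + 1).toNat : Nat) : Int) = z + 1 := Int.toNat_of_nonneg (by linarith)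
    have hy : (((y + 1).toNat : Nat) : Int) = y + 1 := Int.toNat_of_nonneg (by linarith)
    have hW1 : (0 : Int) < (y + 1) * (x + 1) := by positivity
    have h1 := flatMap_decode ((y + 1) * (x + 1)) hW1
      (fun c r => if PySem.Int.mod r (x + 1) + PySem.Int.floordiv r (x + 1) + c ≠ n then
        [[PySem.Int.mod r (x + 1), PySem.Int.floordiv r (x + 1), c]] else []) (z + 1).toNat
    rw [hz] at h1
    have h2 : ∀ c : Int,
        (PySem.List.pyRange 0 ((y + 1) * (x + 1)) 1).flatMap
          (fun r => if PySem.Int.mod r (x + 1) + PySem.Int.floordiv r (x + 1) + c ≠ n then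
            [[PySem.Int.mod r (x + 1), PySem.Int.floordiv r (x + 1), c]] else []) =
        (PySem.List.pyRange 0 (y + 1) 1).flatMap (fun b =>
          (PySem.List.pyRange 0 (x + 1) 1).flatMap (fun a =>
            if a + b + c ≠ n then [[a, b, c]] else [])) := by
      intro c
      have h := flatMap_decode (x + 1) hX
        (fun b a => if a + b + c ≠ n then [[a, b, c]] else []) (y + 1).toNat
      rw [hy] at h
      exact h
    calc (PySem.List.pyRange 0 (z + 1) 1).flatMap (fun c =>
            (PySem.List.pyRange 0 (y + 1) 1).flatMap (fun b =>
              (PySem.List.pyRange 0 (x + 1) 1).flatMap (fun a =>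
                if a + b + c ≠ n then [[a, b, c]] else [])))
        = (PySem.List.pyRange 0 (z + 1) 1).flatMap (fun c =>
            (PySem.List.pyRange 0 ((y + 1) * (x + 1)) 1).flatMap
              (fun r => if PySem.Int.mod r (x + 1) + PySem.Int.floordiv r (x + 1) + c ≠ n then
                [[PySem.Int.mod r (x + 1), PySem.Int.floordiv r (x + 1), c]] else [])) := by
          exact (List.flatMap_congr (fun c _ => h2 c)).symm
      _ = (PySem.List.pyRange 0 ((x + 1) * (y + 1) * (z + 1)) 1).flatMap (bodyB x y n) := by
          rw [show (x + 1) * (y + 1) * (z + 1) = (z + 1) * ((y + 1) * (x + 1)) from by ring]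
          exact h1.symm
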